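-- pv_equiv track=rewrite | github.com/alextoritsin/Algorithms-Specialization | 04_Algorithms_on_Strings/week4/suffix_array_long.py | sort_single_chars
-- ===== SOURCE A (Python) =====
-- def sort_single_chars(text):
--     """
--     Sorts single chars of string `text`
--     with counting sort
--     """
--     char = dict()
--     order = [0] * len(text)
--
--     # count the numb of occur of each char
--     for c in text:
--         if c in char:
--             char[c] += 1
--         else:
--             char[c] = 1
--
--     count = [0] * len(char)
--     # assign value for every letter inside `count` arr
--     # and compute relations btw char and indexes
--     for i, c in enumerate(sorted(char)):
--         count[i] = char[c]
--         char[c] = i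
--
--     # compute partial sums
--     for j in range(1, len(char)):
--         count[j] += count[j - 1]
--     # form order array with sorted chars
--     for i in range(len(text) - 1, -1, -1):
--         c = char[text[i]]
--         count[c] -= 1
--         order[count[c]] = i
--
--     return order
-- ===== SOURCE B (Python) =====
-- def sort_single_chars(text):
--     """
--     Sorts single chars of string `text`: returns the list of indices
--     ordered by character (stable), built by grouping indices into
--     per-character buckets and concatenating them in sorted key order.
--     """
--     buckets = {}
--     for i, c in enumerate(text):
--         buckets.setdefault(c, []).append(i)
--     order = []
--     for c in sorted(buckets):
--         order.extend(buckets[c])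
--     return order
-- ===== Notes on version B (the rewrite author's own statement) =====
-- stated objective: simpler
-- what changed: Replaces the counting-sort machinery (char->count dict, count array, prefix sums, backward placement pass) with a single forward pass that groups indices into per-character bucket lists and concatenates the buckets in sorted key order; fewer passes over the data give a constant-factor speedup.
import Mathlib
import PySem

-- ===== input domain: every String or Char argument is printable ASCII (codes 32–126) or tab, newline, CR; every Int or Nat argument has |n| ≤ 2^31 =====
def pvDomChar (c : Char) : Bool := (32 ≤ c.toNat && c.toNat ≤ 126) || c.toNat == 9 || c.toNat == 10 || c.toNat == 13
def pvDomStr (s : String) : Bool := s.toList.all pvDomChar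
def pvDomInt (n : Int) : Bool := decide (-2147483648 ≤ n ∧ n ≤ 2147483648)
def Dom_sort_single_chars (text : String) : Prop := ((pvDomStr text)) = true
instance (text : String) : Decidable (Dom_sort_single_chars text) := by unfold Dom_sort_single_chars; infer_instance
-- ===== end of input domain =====

-- B replaces A's counting-sort machinery (char->count dict, count array, prefix sums,
-- backward placement pass) with one forward grouping pass into per-character bucket
-- lists, concatenated in sorted key order; same result, simpler structure.

-- ===== PORT A =====
def sort_single_chars (text : String) : List Int :=
  let l := text.toList
  -- char = dict(); for c in text: char[c] += 1 / = 1
  let char0 : PySem.Dict Char Int :=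
    l.foldl (fun d c => if d.contains c then d.insert c (d.getD c 0 + 1) else d.insert c 1)
      PySem.Dict.empty
  -- order = [0] * len(text)
  let order0 : List Int := List.replicate l.length 0
  -- count = [0] * len(char)
  let count0 : List Int := List.replicate char0.size 0
  -- for i, c in enumerate(sorted(char)): count[i] = char[c]; char[c] = i
  let st1 :=
    (PySem.List.enumerate (PySem.List.sorted char0.keys (fun c => c) false) 0).foldl
      (fun (st : List Int × PySem.Dict Char Int) p =>
        (PySem.List.pySetD st.1 p.1 (st.2.getD p.2 0), st.2.insert p.2 p.1))
      (count0, char0)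
  -- for j in range(1, len(char)): count[j] += count[j-1]
  let count2 := (PySem.List.pyRange 1 st1.2.size 1).foldl
      (fun cnt j =>
        PySem.List.pySetD cnt j (PySem.List.pyGetD cnt j 0 + PySem.List.pyGetD cnt (j-1) 0))
      st1.1
  -- for i in range(len(text)-1, -1, -1): c = char[text[i]]; count[c] -= 1; order[count[c]] = i
  let st2 :=
    (PySem.List.pyRange ((l.length : Int) - 1) (-1) (-1)).foldl
      (fun (st : List Int × List Int) i =>
        let c := st1.2.getD (PySem.List.pyGetD l i ' ') 0
        let cnt' := PySem.List.pySetD st.1 c (PySem.List.pyGetD st.1 c 0 - 1)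
        (cnt', PySem.List.pySetD st.2 (PySem.List.pyGetD cnt' c 0) i))
      (count2, order0)
  st2.2

-- ===== PORT B =====
def sort_single_chars_alt (text : String) : List Int :=
  let l := text.toList
  -- buckets = {}; for i, c in enumerate(text): buckets.setdefault(c, []).append(i)
  let buckets : PySem.Dict Char (List Int) :=
    (PySem.List.enumerate l 0).foldl (fun d p => d.modify p.2 [] (· ++ [p.1]))
      PySem.Dict.empty
  -- order = []; for c in sorted(buckets): order.extend(buckets[c])
  (PySem.List.sorted buckets.keys (fun c => c) false).foldl
    (fun acc c => acc ++ buckets.getD c []) []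

-- ===== PRECONDITION & SPEC =====
def Spec_sort_single_chars (text : String) (out : List Int) : Prop := out = sort_single_chars_alt text
instance (text : String) (out : List Int) : Decidable (Spec_sort_single_chars text out) := by unfold Spec_sort_single_chars; infer_instance

-- ===== CLAIM (what is proved, stated in full; the proofs are below) =====
def Claim_equal_sort_single_chars : Prop := ∀ (text : String), Dom_sort_single_chars text → Spec_sort_single_chars text (sort_single_chars text)

-- ===== LEMMAS AND PROOFS =====

-- The common canonical value: for each character c of l, in sorted order, the increasing
-- list of indices holding c ("grp l c"), all concatenated ("Cof l").
def csl (l : List Char) : List Char := PySem.List.sorted (PySem.Set.ofList l) (fun c => c) false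
def grp (l : List Char) (c : Char) : List Int :=
  (PySem.List.pyRange 0 (l.length : Int) 1).filter (fun j => PySem.List.pyGetD l j ' ' == c)
def Cof (l : List Char) : List Int := (csl l).flatMap (grp l)

-- character at a Nat index, counts below/upto a character
def chAt (l : List Char) (i : Nat) : Char := l.getD i ' '
def nlt (l : List Char) (c : Char) : Nat := l.countP (fun x => decide (x < c))
def nle (l : List Char) (c : Char) : Nat := l.countP (fun x => decide (x ≤ c))
-- final position of index i in the stable character sort
def posN (l : List Char) (i : Nat) : Nat := nle l (chAt l i) - (l.drop i).count (chAt l i)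
-- the write effect of A's final loop, processing i = a-1, a-2, …, 0
def Vw (l : List Char) : Nat → List Int → List Int
  | 0, ord => ord
  | a+1, ord => Vw l a (PySem.List.pySetD ord ((posN l a : Nat) : Int) ((a : Nat) : Int))
-- A's count array when indices ≥ a are still unprocessed
def cntS (l : List Char) (a : Nat) : List Int :=
  (csl l).map (fun c => (nle l c : Int) - ((l.drop a).count c : Int))
-- partial sums
def psums (xs : List Int) : List Int :=
  (List.range xs.length).map (fun j => (xs.take (j+1)).sum)
-- Nat-level group
def gN (l : List Char) (b : Nat) (c : Char) : List Nat :=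
  (List.range b).filter (fun j => l.getD j ' ' == c)

-- ---------- csl facts ----------
lemma csl_pairwise (l : List Char) : (csl l).Pairwise (· < ·) := by
  exact PySem.List.sorted_ofList_pairwise_lt ..

lemma csl_nodup (l : List Char) : (csl l).Nodup := by
  exact (csl_pairwise l).imp (fun h => ne_of_lt h)

lemma mem_csl {l : List Char} {c : Char} : c ∈ csl l ↔ c ∈ l := by
  simp [csl, PySem.List.mem_sorted, PySem.Set.mem_ofList]

lemma csl_perm_dedup (l : List Char) : (csl l).Perm l.dedup := by
  rw [List.perm_ext_iff_of_nodup (csl_nodup l) l.nodup_dedup]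
  intro a; simp [mem_csl]

lemma sum_counts (l : List Char) (P : Char → Bool) :
    (((csl l).filter P).map (fun c => l.count c)).sum = l.countP P := by
  have hp : (((csl l).filter P).map (fun c => l.count c)).Perm
      ((l.dedup.filter P).map (fun c => l.count c)) :=
    ((csl_perm_dedup l).filter P).map _
  rw [hp.sum_eq]
  simpa using List.sum_map_count_dedup_filter_eq_countP P l

-- ---------- counting facts ----------
lemma nle_eq (l : List Char) (c : Char) : nle l c = nlt l c + l.count c := by
  unfold nle nlt
  induction l with
  | nil => simp
  | cons x t ih =>
    rcases eq_or_ne x c with rfl | hne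
    · simp [List.countP_cons, List.count_cons, ih]; omega
    · have hxx : (x == c) = false := by simpa using hne
      by_cases h : x < c
      · simp [List.countP_cons, List.count_cons, ih, hxx, h, le_of_lt h]; omega
      · have hxc : ¬ x ≤ c := fun hle => h (lt_of_le_of_ne hle hne)
        simp [List.countP_cons, List.count_cons, ih, hxx, h, hxc]

lemma nle_le_len (l : List Char) (c : Char) : nle l c ≤ l.length := by
  exact List.countP_le_length

lemma nle_le_nlt_of_lt (l : List Char) {c c' : Char} (h : c < c') : nle l c ≤ nlt l c' := by
  exact List.countP_mono_left (fun x _ hx => by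
    simp only [decide_eq_true_eq] at *; exact lt_of_le_of_lt hx h)

lemma count_drop_le (l : List Char) (i : Nat) (c : Char) :
    (l.drop i).count c ≤ l.count c := by
  exact (List.drop_sublist _ _).count_le c

lemma count_le_nle (l : List Char) (c : Char) : l.count c ≤ nle l c := by
  have := nle_eq l c; omega

lemma chAt_mem {l : List Char} {i : Nat} (h : i < l.length) : chAt l i ∈ l := by
  unfold chAt; rw [List.getD_eq_getElem l ' ' h]; exact List.getElem_mem h

lemma drop_cons_chAt {l : List Char} {i : Nat} (h : i < l.length) :
    l.drop i = chAt l i :: l.drop (i+1) := by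
  unfold chAt; rw [List.getD_eq_getElem l ' ' h]; exact List.drop_eq_getElem_cons h

lemma count_drop_pos {l : List Char} {i : Nat} (h : i < l.length) :
    1 ≤ (l.drop i).count (chAt l i) := by
  rw [drop_cons_chAt h]; simp [List.count_cons]

lemma count_take_add_drop (l : List Char) (i : Nat) (c : Char) :
    (l.take i).count c + (l.drop i).count c = l.count c := by
  rw [← List.count_append, List.take_append_drop]

lemma posN_lt {l : List Char} {i : Nat} (h : i < l.length) : posN l i < l.length := by
  unfold posN
  have h1 := count_drop_pos h
  have h2 := count_drop_le l i (chAt l i)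
  have h3 := count_le_nle l (chAt l i)
  have h4 := nle_le_len l (chAt l i)
  omega

lemma posN_eq {l : List Char} {i : Nat} (h : i < l.length) :
    posN l i = nlt l (chAt l i) + (l.take i).count (chAt l i) := by
  unfold posN
  have h1 := count_take_add_drop l i (chAt l i)
  have h2 := nle_eq l (chAt l i)
  have h3 := count_drop_pos h
  omega

lemma count_drop_mono (l : List Char) {i j : Nat} (hij : i ≤ j) (c : Char) :
    (l.drop j).count c ≤ (l.drop i).count c := by
  have : l.drop j = (l.drop i).drop (j - i) := by
    rw [List.drop_drop]; congr 1; omega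
  rw [this]; exact (List.drop_sublist _ _).count_le c

lemma posN_inj {l : List Char} {i j : Nat} (hij : i < j) (hj : j < l.length) :
    posN l i ≠ posN l j := by
  have hi : i < l.length := lt_trans hij hj
  rcases lt_trichotomy (chAt l i) (chAt l j) with h | h | h
  · -- chAt i < chAt j : posN i < nle (chAt i) ≤ nlt (chAt j) ≤ posN j
    have h1 : posN l i < nle l (chAt l i) := by
      unfold posN
      have := count_drop_pos hi
      have := count_drop_le l i (chAt l i)
      have := count_le_nle l (chAt l i)
      omega
    have h2 := nle_le_nlt_of_lt l h
    have h3 : nlt l (chAt l j) ≤ posN l j := by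
      unfold posN
      have := nle_eq l (chAt l j)
      have := count_drop_le l j (chAt l j)
      omega
    omega
  · -- same character: strictly fewer remaining occurrences at j
    have hcnt : (l.drop j).count (chAt l j) < (l.drop i).count (chAt l i) := by
      have hd : l.drop i = chAt l i :: l.drop (i+1) := drop_cons_chAt hi
      have hmono := count_drop_mono l (show i+1 ≤ j by omega) (chAt l i)
      rw [hd]
      rw [h] at hmono ⊢
      simp [List.count_cons]
      omega
    unfold posN
    rw [h]
    have := count_drop_le l j (chAt l j)
    have := count_le_nle l (chAt l j)
    have := count_drop_le l i (chAt l i)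
    rw [h] at *
    omega
  · -- chAt j < chAt i
    have h1 : posN l j < nle l (chAt l j) := by
      unfold posN
      have := count_drop_pos hj
      have := count_drop_le l j (chAt l j)
      have := count_le_nle l (chAt l j)
      omega
    have h2 := nle_le_nlt_of_lt l h
    have h3 : nlt l (chAt l i) ≤ posN l i := by
      unfold posN
      have := nle_eq l (chAt l i)
      have := count_drop_le l i (chAt l i)
      omega
    omega

lemma posN_surj {l : List Char} {p : Nat} (hp : p < l.length) :
    ∃ i, i < l.length ∧ posN l i = p := by
  have hnd : ((List.range l.length).map (posN l)).Nodup := by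
    rw [List.Nodup, List.pairwise_iff_getElem]
    intro i j hi hj hij
    simp only [List.getElem_map, List.getElem_range]
    simp only [List.length_map, List.length_range] at hi hj
    exact posN_inj hij hj
  have hsub : ((List.range l.length).map (posN l)) ⊆ List.range l.length := by
    intro x hx
    obtain ⟨i, hi, rfl⟩ := List.mem_map.mp hx
    rw [List.mem_range] at *
    exact posN_lt hi
  have hperm := (hnd.subperm hsub).perm_of_length_le (by simp)
  have hmem : p ∈ (List.range l.length).map (posN l) :=
    hperm.mem_iff.mpr (by simpa using hp)
  obtain ⟨i, hi, hpi⟩ := List.mem_map.mp hmem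
  exact ⟨i, by simpa using hi, hpi⟩

-- ---------- grp facts ----------
lemma grp_eq (l : List Char) (c : Char) :
    grp l c = (gN l l.length c).map (fun j => Int.ofNat j) := by
  unfold grp gN
  rw [PySem.List.pyRange_zero_natCast, List.filter_map]
  congr 1
  apply List.filter_congr
  intro j _
  simp

lemma length_gN (l : List Char) :
    ∀ b, b ≤ l.length → ∀ c, (gN l b c).length = (l.take b).count c := by
  intro b
  induction b with
  | zero => intro _ c; simp [gN]
  | succ b ih =>
    intro hb c
    have hbl : b < l.length := hb
    unfold gN at *
    rw [List.range_succ, List.filter_append, List.length_append, ih (by omega) c]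
    by_cases hbc : l[b] = c
    · have hcnt : List.count c (List.take (b+1) l) = List.count c (List.take b l) + 1 := by
        rw [List.take_succ, List.getElem?_eq_getElem hbl]
        simp [hbc]
      simp [List.filter_singleton, List.getD_eq_getElem l ' ' hbl, hbc, hcnt,
        List.getElem?_eq_getElem hbl]
    · have hcnt : List.count c (List.take (b+1) l) = List.count c (List.take b l) := by
        rw [List.take_add_one, List.getElem?_eq_getElem hbl, Option.toList_some,
          List.count_append, List.count_singleton]
        simp [hbc]
      simp [List.filter_singleton, List.getD_eq_getElem l ' ' hbl, hbc, hcnt,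
        List.getElem?_eq_getElem hbl]

lemma count_take_succ {l : List Char} {i : Nat} {c : Char} (h : i < l.length)
    (hc : chAt l i = c) : (l.take (i+1)).count c = (l.take i).count c + 1 := by
  rw [List.take_succ, List.getElem?_eq_getElem h, Option.toList_some, List.count_append]
  have : l[i] = c := by
    have := hc; unfold chAt at this; rwa [List.getD_eq_getElem l ' ' h] at this
  simp [this]

lemma count_take_le_of_le {l : List Char} {i j : Nat} (h : i ≤ j) (c : Char) :
    (l.take i).count c ≤ (l.take j).count c := by
  have : l.take i = (l.take j).take i := by rw [List.take_take, min_eq_left h]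
  rw [this]
  exact ((l.take j).take_sublist i).count_le c

lemma gN_get (l : List Char) :
    ∀ b, b ≤ l.length → ∀ i, i < b → ∀ c, chAt l i = c →
      (gN l b c)[(l.take i).count c]? = some i := by
  intro b
  induction b with
  | zero => intro _ i hi; omega
  | succ b ih =>
    intro hb i hi c hc
    have hbl : b < l.length := hb
    unfold gN at *
    rw [List.range_succ, List.filter_append]
    rcases Nat.lt_or_ge i b with h | h
    · have hlen : (l.take i).count c < (List.filter (fun j => l.getD j ' ' == c) (List.range b)).length := by
        rw [show (List.filter (fun j => l.getD j ' ' == c) (List.range b)) = gN l b c from rfl,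
          length_gN l b (by omega) c]
        have h1 := count_take_succ (show i < l.length by omega) hc
        have h2 := count_take_le_of_le (show i + 1 ≤ b by omega) c (l := l)
        omega
      rw [List.getElem?_append_left hlen]
      exact ih (by omega) i h c hc
    · have hib : i = b := by omega
      subst hib
      have hlen : (List.filter (fun j => l.getD j ' ' == c) (List.range i)).length = (l.take i).count c := by
        rw [show (List.filter (fun j => l.getD j ' ' == c) (List.range i)) = gN l i c from rfl,
          length_gN l i (by omega) c]
      rw [List.getElem?_append_right (by omega)]
      rw [hlen, Nat.sub_self]
      have h2 : l[i] = c := by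
        rw [← List.getD_eq_getElem l ' ' hbl]; exact hc
      simp [List.filter_singleton, h2, List.getElem?_eq_getElem hbl]

lemma length_grp (l : List Char) (c : Char) : (grp l c).length = l.count c := by
  rw [grp_eq]
  simp [length_gN l l.length le_rfl c]

lemma grp_get {l : List Char} {c : Char} {i : Nat} (h : i < l.length) (hc : chAt l i = c) :
    (grp l c)[(l.take i).count c]? = some (i : Int) := by
  have hg := gN_get l l.length le_rfl i h c hc
  rw [grp_eq, List.getElem?_map, hg]
  rfl

-- ---------- flatMap indexing ----------
lemma flat_get (l : List Char) :
    ∀ (ds : List Char) (o : Nat), ds.Pairwise (· < ·) →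
      (∀ c ∈ ds, nlt l c = o + (((ds.filter (fun c' => decide (c' < c))).map (fun c' => l.count c')).sum)) →
      ∀ i, i < l.length → chAt l i ∈ ds →
        (ds.flatMap (grp l))[posN l i - o]? = some ((i : Nat) : Int) := by
  intro ds
  induction ds with
  | nil => intro o _ _ i _ hmem; simp at hmem
  | cons c rest ih =>
    intro o hpw ho i hil hmem
    rw [List.flatMap_cons]
    have hpc := List.pairwise_cons.mp hpw
    have hco : nlt l c = o := by
      have h1 := ho c List.mem_cons_self
      have h2 : (c :: rest).filter (fun c' => decide (c' < c)) = [] := by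
        rw [List.filter_eq_nil_iff]
        intro a ha
        rcases List.mem_cons.mp ha with rfl | har
        · simp
        · simpa using not_lt_of_gt (hpc.1 _ har)
      rw [h2] at h1
      simpa using h1
    rcases List.mem_cons.mp hmem with hceq | hcr
    · have hcnt1 : 1 ≤ (l.drop i).count c := by
        rw [← hceq]; exact count_drop_pos hil
      have hidx : posN l i - o = (l.take i).count c := by
        rw [posN_eq hil, hceq, hco]; omega
      have hlt : (l.take i).count c < (grp l c).length := by
        rw [length_grp]
        have h1 := count_take_add_drop l i c
        omega
      rw [hidx, List.getElem?_append_left hlt]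
      exact grp_get hil hceq
    · have ho' : ∀ c2 ∈ rest, nlt l c2
          = (o + l.count c) + ((rest.filter (fun c' => decide (c' < c2))).map (fun c' => l.count c')).sum := by
        intro c2 hc2
        have hcc2 : c < c2 := hpc.1 _ hc2
        have h1 := ho c2 (List.mem_cons_of_mem _ hc2)
        rw [List.filter_cons_of_pos (by simpa using hcc2)] at h1
        simp only [List.map_cons, List.sum_cons] at h1
        omega
      have hnlt : o + l.count c ≤ nlt l (chAt l i) := by
        have := ho' (chAt l i) hcr
        omega
      have hpos : (grp l c).length ≤ posN l i - o := by
        rw [length_grp, posN_eq hil]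
        omega
      rw [List.getElem?_append_right hpos]
      have hrec := ih (o + l.count c) hpc.2 ho' i hil hcr
      have harith : posN l i - o - (grp l c).length = posN l i - (o + l.count c) := by
        rw [length_grp, posN_eq hil]
        omega
      rw [harith]
      exact hrec

lemma Cof_get {l : List Char} {i : Nat} (h : i < l.length) :
    (Cof l)[posN l i]? = some ((i : Nat) : Int) := by
  unfold Cof
  have h0 : ∀ c ∈ csl l, nlt l c
      = 0 + (((csl l).filter (fun c' => decide (c' < c))).map (fun c' => l.count c')).sum := by
    intro c _
    rw [Nat.zero_add, sum_counts l (fun c' => decide (c' < c))]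
    rfl
  have hfg := flat_get l (csl l) 0 (csl_pairwise l) h0 i h (mem_csl.mpr (chAt_mem h))
  simpa using hfg

lemma Cof_length (l : List Char) : (Cof l).length = l.length := by
  unfold Cof
  rw [List.length_flatMap]
  have h1 : (List.map (fun c => (grp l c).length) (csl l)) = (List.map (fun c => l.count c) (csl l)) := by
    exact List.map_congr_left (fun c _ => length_grp l c)
  rw [h1]
  have h2 := sum_counts l (fun _ => true)
  simpa using h2

-- ---------- Vw facts ----------
lemma length_Vw (l : List Char) : ∀ a ord, (Vw l a ord).length = ord.length := by
  intro a
  induction a with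
  | zero => intro ord; rfl
  | succ a ih =>
    intro ord
    show (Vw l a _).length = _
    rw [ih]
    simp

lemma Vw_miss (l : List Char) :
    ∀ a ord (p : Nat), (∀ j, j < a → posN l j ≠ p) → (Vw l a ord)[p]? = ord[p]? := by
  intro a
  induction a with
  | zero => intro ord p _; rfl
  | succ a ih =>
    intro ord p h
    show (Vw l a _)[p]? = _
    rw [ih _ _ (fun j hj => h j (by omega))]
    simp only [PySem.List.pySetD_natCast]
    exact List.getElem?_set_ne (h a (by omega))

lemma Vw_hit (l : List Char) :
    ∀ a, a ≤ l.length → ∀ ord, ord.length = l.length → ∀ i, i < a →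
      (Vw l a ord)[posN l i]? = some ((i : Nat) : Int) := by
  intro a
  induction a with
  | zero => intro _ _ _ i hi; omega
  | succ a ih =>
    intro ha ord hord i hi
    show (Vw l a _)[posN l i]? = _
    rcases Nat.lt_or_ge i a with h | h
    · exact ih (by omega) _ (by simp [hord]) i h
    · have hia : i = a := by omega
      rw [hia]
      rw [Vw_miss l a _ _ (fun j hj => posN_inj hj (by omega))]
      simp only [PySem.List.pySetD_natCast]
      exact List.getElem?_set_self (by rw [hord]; exact posN_lt (by omega))

lemma Vw_eq_Cof (l : List Char) :
    Vw l l.length (List.replicate l.length 0) = Cof l := by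
  apply List.ext_getElem?
  intro p
  rcases Nat.lt_or_ge p l.length with hp | hp
  · obtain ⟨i, hi, hpi⟩ := posN_surj hp
    rw [← hpi, Vw_hit l l.length le_rfl _ (by simp) i hi, Cof_get hi]
  · rw [List.getElem?_eq_none, List.getElem?_eq_none]
    · rw [Cof_length]; exact hp
    · rw [length_Vw]; simpa using hp

-- ---------- A: stage 1, the counting dict ----------
lemma char0_eq (l : List Char) :
    l.foldl (fun d c => if d.contains c then d.insert c (d.getD c 0 + 1) else d.insert c 1)
      PySem.Dict.empty = PySem.Dict.counter l := by
  have hstep : (fun (d : PySem.Dict Char Int) c =>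
      if d.contains c then d.insert c (d.getD c 0 + 1) else d.insert c 1)
      = fun (d : PySem.Dict Char Int) c => d.insert c (d.getD c 0 + 1) := by
    funext d c
    by_cases h : d.contains c = true
    · simp [h]
    · have h' : d.contains c = false := by simpa using h
      rw [if_neg (by simp [h']), PySem.Dict.getD_of_not_contains d 0 h']
      norm_num
  rw [hstep, PySem.Dict.foldl_insert_getD_add_one_eq_counter]

lemma dict_size_eq_keys_length {κ ν : Type} [BEq κ] (d : PySem.Dict κ ν) :
    d.size = d.keys.length := by
  simp [PySem.Dict.size, PySem.Dict.keys]

-- ---------- A: stage 2, the enumerate loop ----------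
lemma take_set_succ (xs : List Int) (s : Nat) (v : Int) (h : s < xs.length) :
    (xs.set s v).take (s+1) = xs.take s ++ [v] := by
  induction s generalizing xs with
  | zero =>
    cases xs with
    | nil => simp at h
    | cons y t => simp
  | succ s ih =>
    cases xs with
    | nil => simp at h
    | cons y t =>
      simp only [List.set_cons_succ, List.take_succ_cons, List.cons_append]
      rw [ih t (by simpa using h)]

lemma enumA :
    ∀ (ds : List Char), ds.Nodup → ∀ (s : Nat) (cnt : List Int) (d : PySem.Dict Char Int),
      cnt.length = s + ds.length →
      (let r := (PySem.List.enumerate ds ((s : Nat) : Int)).foldl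
        (fun (st : List Int × PySem.Dict Char Int) p =>
          (PySem.List.pySetD st.1 p.1 (st.2.getD p.2 0), st.2.insert p.2 p.1)) (cnt, d)
      r.1 = cnt.take s ++ ds.map (fun c => d.getD c 0)
      ∧ (∀ c : Char, r.2.getD c 0 = if c ∈ ds then (((s + ds.idxOf c : Nat)) : Int) else d.getD c 0)
      ∧ ((∀ c ∈ ds, d.contains c = true) → r.2.keys = d.keys)) := by
  intro ds
  induction ds with
  | nil =>
    intro _ s cnt d hlen
    refine ⟨?_, ?_, ?_⟩
    · have h : cnt.length = s := by simpa using hlen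
      simp [PySem.List.enumerate_nil, List.take_of_length_le (le_of_eq h)]
    · intro c; simp [PySem.List.enumerate_nil]
    · intro _; simp [PySem.List.enumerate_nil]
  | cons c0 rest ih =>
    intro hnd s cnt d hlen
    obtain ⟨hc0, hndr⟩ := List.nodup_cons.mp hnd
    have hs1 : ((s : Nat) : Int) + 1 = (((s+1 : Nat)) : Int) := by push_cast; ring
    have hslen : s < cnt.length := by simp at hlen; omega
    have ihh := ih hndr (s+1) (cnt.set s (d.getD c0 0)) (d.insert c0 ((s : Nat) : Int))
      (by simp at hlen ⊢; omega)
    obtain ⟨ih1, ih2, ih3⟩ := ihh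
    rw [PySem.List.enumerate_cons, List.foldl_cons]
    simp only [PySem.List.pySetD_natCast, hs1]
    refine ⟨?_, ?_, ?_⟩
    · rw [ih1, take_set_succ cnt s _ hslen]
      have hmap : rest.map (fun c => (d.insert c0 ((s : Nat) : Int)).getD c 0)
          = rest.map (fun c => d.getD c 0) :=
        List.map_congr_left (fun c hc =>
          PySem.Dict.getD_insert_of_ne d _ 0 (fun h => hc0 (h ▸ hc)))
      rw [hmap, List.map_cons, List.append_assoc, List.singleton_append]
    · intro c
      rw [ih2 c]
      by_cases hcr : c ∈ rest
      · rw [if_pos hcr, if_pos (List.mem_cons_of_mem _ hcr)]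
        have hne : c0 ≠ c := fun h => hc0 (h ▸ hcr)
        rw [List.idxOf_cons_ne rest hne]
        push_cast
        ring
      · rw [if_neg hcr]
        by_cases hcc0 : c = c0
        · subst hcc0
          rw [PySem.Dict.getD_insert_self, if_pos List.mem_cons_self, List.idxOf_cons_self]
          simp
        · rw [PySem.Dict.getD_insert_of_ne d _ 0 hcc0, if_neg (by simp [hcc0, hcr])]
    · intro hall
      rw [ih3 ?_, PySem.Dict.keys_insert_of_contains d _ (hall c0 List.mem_cons_self)]
      intro c hc
      rw [PySem.Dict.contains_insert]
      simp [hall c (List.mem_cons_of_mem _ hc)]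

-- ---------- A: stage 3, prefix sums ----------
lemma psums_append (ys : List Int) (a : Int) :
    psums (ys ++ [a]) = psums ys ++ [ys.sum + a] := by
  unfold psums
  rw [List.length_append, List.length_singleton, List.range_succ, List.map_append]
  congr 1
  · exact List.map_congr_left (fun j hj => by
      rw [List.take_append_of_le_length (by simpa using hj)])
  · simp

lemma psLoop_frame :
    ∀ (js : List Int) (ys : List Int) (a : Int), (∀ j ∈ js, 1 ≤ j ∧ j < (ys.length : Int)) →
      js.foldl (fun cnt j =>
        PySem.List.pySetD cnt j (PySem.List.pyGetD cnt j 0 + PySem.List.pyGetD cnt (j-1) 0))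
        (ys ++ [a])
      = js.foldl (fun cnt j =>
        PySem.List.pySetD cnt j (PySem.List.pyGetD cnt j 0 + PySem.List.pyGetD cnt (j-1) 0))
        ys ++ [a] := by
  intro js
  induction js with
  | nil => intro ys a _; rfl
  | cons j t ih =>
    intro ys a hb
    obtain ⟨hj1, hj2⟩ := hb j List.mem_cons_self
    obtain ⟨jN, rfl⟩ : ∃ jN : Nat, j = (jN : Int) :=
      ⟨j.toNat, (Int.toNat_of_nonneg (by omega)).symm⟩
    have hjN : jN < ys.length := by exact_mod_cast hj2
    have hjN1 : 1 ≤ jN := by exact_mod_cast hj1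
    rw [List.foldl_cons, List.foldl_cons]
    have hjm : ((jN : Int) - 1) = ((jN - 1 : Nat) : Int) := by omega
    have hg1 : PySem.List.pyGetD (ys ++ [a]) ((jN : Nat) : Int) 0 = PySem.List.pyGetD ys ((jN : Nat) : Int) 0 := by
      rw [PySem.List.pyGetD_natCast, PySem.List.pyGetD_natCast]
      exact List.getD_append _ _ _ _ hjN
    have hg2 : PySem.List.pyGetD (ys ++ [a]) ((jN : Int) - 1) 0 = PySem.List.pyGetD ys ((jN : Int) - 1) 0 := by
      rw [hjm, PySem.List.pyGetD_natCast, PySem.List.pyGetD_natCast]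
      exact List.getD_append _ _ _ _ (by omega)
    have hset : ∀ v, PySem.List.pySetD (ys ++ [a]) ((jN : Nat) : Int) v
        = PySem.List.pySetD ys ((jN : Nat) : Int) v ++ [a] := by
      intro v
      rw [PySem.List.pySetD_natCast, PySem.List.pySetD_natCast, List.set_append, if_pos hjN]
    rw [hg1, hg2, hset]
    apply ih
    intro x hx
    have h := hb x (List.mem_cons_of_mem _ hx)
    simpa [PySem.List.pySetD_natCast] using h

lemma psLoop_eq (xs : List Int) :
    (PySem.List.pyRange 1 (xs.length : Int) 1).foldl
      (fun cnt j =>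
        PySem.List.pySetD cnt j (PySem.List.pyGetD cnt j 0 + PySem.List.pyGetD cnt (j-1) 0))
      xs = psums xs := by
  induction xs using List.reverseRecOn with
  | nil =>
    rw [show ((List.length ([] : List Int) : Int)) = 0 by simp,
      PySem.List.pyRange_one_eq_nil (by norm_num)]
    simp [psums]
  | append_singleton ys a ih =>
    by_cases hys : ys = []
    · subst hys
      simp only [List.nil_append, List.length_singleton, Nat.cast_one]
      rw [PySem.List.pyRange_one_eq_nil le_rfl]
      simp [psums]
    · have hys1 : 1 ≤ ys.length := List.length_pos_of_ne_nil hys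
      have hlen : ((ys ++ [a]).length : Int) = (ys.length : Int) + 1 := by simp
      rw [hlen, PySem.List.pyRange_one_succ_right (by exact_mod_cast hys1), List.foldl_append,
        psLoop_frame _ ys a (fun j hj => by
          rw [PySem.List.mem_pyRange_one] at hj; exact ⟨hj.1, hj.2⟩),
        ih, List.foldl_cons, List.foldl_nil]
      have hPlen : (psums ys).length = ys.length := by simp [psums]
      have hm : ((ys.length : Nat) : Int) - 1 = ((ys.length - 1 : Nat) : Int) := by omega
      have hg1 : PySem.List.pyGetD (psums ys ++ [a]) ((ys.length : Nat) : Int) 0 = a := by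
        rw [PySem.List.pyGetD_natCast, List.getD_append_right _ _ _ _ (by omega)]
        simp [hPlen]
      have hg2 : PySem.List.pyGetD (psums ys ++ [a]) ((ys.length : Int) - 1) 0 = ys.sum := by
        rw [hm, PySem.List.pyGetD_natCast, List.getD_append _ _ _ _ (by omega)]
        rw [List.getD_eq_getElem _ _ (by omega)]
        unfold psums
        rw [List.getElem_map, List.getElem_range, show ys.length - 1 + 1 = ys.length by omega,
          List.take_of_length_le le_rfl]
      rw [hg1, hg2, PySem.List.pySetD_natCast, List.set_append, if_neg (by omega),
        psums_append]
      have h0 : ys.length - (psums ys).length = 0 := by omega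
      rw [h0]
      simp [List.set_cons_zero, Int.add_comm]

lemma sum_map_intCast (xs : List Char) (f : Char → Nat) :
    (xs.map (fun c => (f c : Int))).sum = ((xs.map f).sum : Int) := by
  induction xs with
  | nil => simp
  | cons x t ih => simp [ih]

lemma csl_filter_le_take (l : List Char) {j : Nat} (hj : j < (csl l).length) :
    (csl l).filter (fun c' => decide (c' ≤ (csl l)[j])) = (csl l).take (j+1) := by
  have hpw := List.pairwise_iff_getElem.mp (csl_pairwise l)
  obtain ⟨cj, hcj⟩ : ∃ cj, (csl l)[j] = cj := ⟨_, rfl⟩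
  rw [hcj]
  conv_lhs => rw [← List.take_append_drop (j+1) (csl l)]
  rw [List.filter_append]
  have h1 : ((csl l).take (j+1)).filter (fun c' => decide (c' ≤ cj))
      = (csl l).take (j+1) := by
    rw [List.filter_eq_self]
    intro c hc
    obtain ⟨t, ht, rfl⟩ := List.mem_iff_getElem.mp hc
    rw [List.getElem_take]
    have htj : t ≤ j := by
      have := ht; rw [List.length_take] at this; omega
    rcases Nat.lt_or_ge t j with h | h
    · have hlt := hpw t j (by omega) hj h
      rw [hcj] at hlt
      simpa using le_of_lt hlt
    · have : t = j := by omega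
      subst this
      simp [← hcj]
  have h2 : ((csl l).drop (j+1)).filter (fun c' => decide (c' ≤ cj)) = [] := by
    rw [List.filter_eq_nil_iff]
    intro c hc
    obtain ⟨t, ht, rfl⟩ := List.mem_iff_getElem.mp hc
    rw [List.getElem_drop]
    have hlt := hpw j (j+1+t) hj (by rw [List.length_drop] at ht; omega) (by omega)
    rw [hcj] at hlt
    simpa using not_le_of_gt hlt
  rw [h1, h2, List.append_nil]

lemma psums_counts (l : List Char) :
    psums ((csl l).map (fun c => (l.count c : Int))) = cntS l l.length := by
  apply List.ext_getElem
  · simp [psums, cntS]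
  · intro j hj1 hj2
    have hjK : j < (csl l).length := by simpa [psums] using hj1
    unfold psums
    rw [List.getElem_map, List.getElem_range, ← List.map_take]
    have hsum := sum_map_intCast ((csl l).take (j+1)) (fun c => l.count c)
    rw [hsum, ← csl_filter_le_take l hjK]
    have hcnt := sum_counts l (fun c' => decide (c' ≤ (csl l)[j]))
    rw [hcnt]
    unfold cntS
    rw [List.getElem_map]
    simp [List.drop_length, nle]

-- ---------- A: stage 4, the placement loop ----------
lemma place (l : List Char) (d1 : PySem.Dict Char Int)
    (hd1 : ∀ c ∈ csl l, d1.getD c 0 = (((csl l).idxOf c : Nat) : Int)) :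
    ∀ a, a ≤ l.length → ∀ ord : List Int,
      (PySem.List.pyRange ((a : Int) - 1) (-1) (-1)).foldl
        (fun (st : List Int × List Int) i =>
          let c := d1.getD (PySem.List.pyGetD l i ' ') 0
          let cnt' := PySem.List.pySetD st.1 c (PySem.List.pyGetD st.1 c 0 - 1)
          (cnt', PySem.List.pySetD st.2 (PySem.List.pyGetD cnt' c 0) i))
        (cntS l a, ord)
      = (cntS l 0, Vw l a ord) := by
  intro a
  induction a with
  | zero =>
    intro _ ord
    rw [show ((0 : Nat) : Int) - 1 = -1 by norm_num, PySem.List.pyRange_neg_one_eq_nil le_rfl]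
    rfl
  | succ a ih =>
    intro ha ord
    have ha' : a < l.length := ha
    have hca : PySem.List.pyGetD l ((a : Nat) : Int) ' ' = chAt l a := by
      rw [PySem.List.pyGetD_natCast]; rfl
    have hmem : chAt l a ∈ csl l := mem_csl.mpr (chAt_mem ha')
    have hrN : (csl l).idxOf (chAt l a) < (csl l).length := List.idxOf_lt_length_of_mem hmem
    have hgetr : (csl l)[(csl l).idxOf (chAt l a)] = chAt l a := List.getElem_idxOf hrN
    have hd1a := hd1 (chAt l a) hmem
    -- the count entry read before the decrement
    have hread : PySem.List.pyGetD (cntS l (a+1)) (((csl l).idxOf (chAt l a) : Nat) : Int) 0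
        = (nle l (chAt l a) : Int) - ((l.drop (a+1)).count (chAt l a) : Int) := by
      rw [PySem.List.pyGetD_natCast, List.getD_eq_getElem _ _ (by simpa [cntS] using hrN)]
      unfold cntS
      rw [List.getElem_map, hgetr]
    -- the decremented count array is cntS l a
    have hcnt' : PySem.List.pySetD (cntS l (a+1)) (((csl l).idxOf (chAt l a) : Nat) : Int)
        (((nle l (chAt l a) : Int) - ((l.drop (a+1)).count (chAt l a) : Int)) - 1) = cntS l a := by
      rw [PySem.List.pySetD_natCast]
      apply List.ext_getElem
      · simp [cntS]
      · intro k hk1 hk2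
        have hkK : k < (csl l).length := by simpa [cntS] using hk2
        have hkK : k < (csl l).length := by simpa [cntS] using hk2
        rw [List.getElem_set]
        unfold cntS
        simp only [List.getElem_map]
        by_cases hkr : (csl l).idxOf (chAt l a) = k
        · subst hkr
          rw [if_pos rfl]
          simp only [hgetr]
          have hdc : (l.drop a).count (chAt l a) = (l.drop (a+1)).count (chAt l a) + 1 := by
            rw [drop_cons_chAt ha', List.count_cons]
            simp
          rw [hdc]
          push_cast
          ring
        · rw [if_neg hkr]
          have hne : (csl l)[k]'hkK ≠ chAt l a := by
            intro h
            apply hkr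
            have heq : (csl l)[(csl l).idxOf (chAt l a)]'hrN = (csl l)[k]'hkK := by
              rw [hgetr, h]
            exact ((csl_nodup l).getElem_inj_iff).mp heq
          have hne' : ¬ (chAt l a = (csl l)[k]'hkK) := by
            intro h; exact hne h.symm
          have hdc : (l.drop a).count ((csl l)[k]'hkK) = (l.drop (a+1)).count ((csl l)[k]'hkK) := by
            rw [drop_cons_chAt ha', List.count_cons]
            simp [hne']
          rw [hdc]
    -- the written position equals posN l a
    have hwrite : PySem.List.pyGetD (cntS l a) (((csl l).idxOf (chAt l a) : Nat) : Int) 0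
        = ((posN l a : Nat) : Int) := by
      rw [PySem.List.pyGetD_natCast, List.getD_eq_getElem _ _ (by simpa [cntS] using hrN)]
      unfold cntS posN
      rw [List.getElem_map, hgetr]
      have h1 := count_drop_le l a (chAt l a)
      have h2 := count_le_nle l (chAt l a)
      omega
    have hrange : ((a + 1 : Nat) : Int) - 1 = ((a : Nat) : Int) := by push_cast; ring
    rw [hrange, PySem.List.pyRange_neg_one_cons (by omega), List.foldl_cons]
    show (PySem.List.pyRange ((a : Int) - 1) (-1) (-1)).foldl _ (_, _) = _
    rw [hca, hd1a, hread, hcnt', hwrite]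
    show (PySem.List.pyRange ((a : Int) - 1) (-1) (-1)).foldl _
      (cntS l a, PySem.List.pySetD ord ((posN l a : Nat) : Int) ((a : Nat) : Int)) = _
    rw [ih (by omega) _]
    rfl

-- ---------- assembling A ----------
theorem a_eq_C (l : List Char) :
    (let char0 : PySem.Dict Char Int :=
      l.foldl (fun d c => if d.contains c then d.insert c (d.getD c 0 + 1) else d.insert c 1)
        PySem.Dict.empty
    let order0 : List Int := List.replicate l.length 0
    let count0 : List Int := List.replicate char0.size 0
    let st1 :=
      (PySem.List.enumerate (PySem.List.sorted char0.keys (fun c => c) false) 0).foldl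
        (fun (st : List Int × PySem.Dict Char Int) p =>
          (PySem.List.pySetD st.1 p.1 (st.2.getD p.2 0), st.2.insert p.2 p.1))
        (count0, char0)
    let count2 := (PySem.List.pyRange 1 st1.2.size 1).foldl
        (fun cnt j =>
          PySem.List.pySetD cnt j (PySem.List.pyGetD cnt j 0 + PySem.List.pyGetD cnt (j-1) 0))
        st1.1
    let st2 :=
      (PySem.List.pyRange ((l.length : Int) - 1) (-1) (-1)).foldl
        (fun (st : List Int × List Int) i =>
          let c := st1.2.getD (PySem.List.pyGetD l i ' ') 0
          let cnt' := PySem.List.pySetD st.1 c (PySem.List.pyGetD st.1 c 0 - 1)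
          (cnt', PySem.List.pySetD st.2 (PySem.List.pyGetD cnt' c 0) i))
        (count2, order0)
    st2.2) = Cof l := by
  dsimp only
  rw [char0_eq l]
  rw [PySem.Dict.keys_counter]
  rw [show PySem.List.sorted (PySem.Set.ofList l) (fun c => c) false = csl l from rfl]
  rw [dict_size_eq_keys_length (PySem.Dict.counter l), PySem.Dict.keys_counter]
  rw [show ((PySem.Set.ofList l : List Char)).length = (csl l).length from
    (PySem.List.length_sorted (PySem.Set.ofList l) (fun c => c) false).symm]
  set st1 := (PySem.List.enumerate (csl l) 0).foldl
      (fun (st : List Int × PySem.Dict Char Int) p =>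
        (PySem.List.pySetD st.1 p.1 (st.2.getD p.2 0), st.2.insert p.2 p.1))
      (List.replicate (csl l).length 0, PySem.Dict.counter l) with hst1
  obtain ⟨h1, h2, h3⟩ := enumA (csl l) (csl_nodup l) 0 (List.replicate (csl l).length 0)
    (PySem.Dict.counter l) (by simp)
  simp only [Nat.cast_zero, List.take_zero, List.nil_append, Nat.zero_add] at h1 h2 h3
  rw [← hst1] at h1 h2 h3
  have h1' : st1.1 = (csl l).map (fun c => (l.count c : Int)) := by
    rw [h1]
    exact List.map_congr_left (fun c _ => PySem.Dict.getD_counter l c)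
  rw [h1']
  have hcont : ∀ c ∈ csl l, (PySem.Dict.counter l).contains c = true := by
    intro c hc
    rw [PySem.Dict.contains_counter]
    have := mem_csl.mp hc
    simp [this]
  have hkeys1 := h3 hcont
  have hsz : st1.2.size = (csl l).length := by
    rw [dict_size_eq_keys_length, hkeys1, PySem.Dict.keys_counter]
    exact (PySem.List.length_sorted (PySem.Set.ofList l) (fun c => c) false).symm
  rw [hsz]
  rw [show (((csl l).length : Nat) : Int)
      = ((((csl l).map (fun c => (l.count c : Int))).length : Nat) : Int) by simp]
  rw [psLoop_eq ((csl l).map (fun c => (l.count c : Int)))]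
  rw [psums_counts l]
  have hd1 : ∀ c ∈ csl l, st1.2.getD c 0 = (((csl l).idxOf c : Nat) : Int) := by
    intro c hc
    rw [h2 c, if_pos hc]
  have hplace := place l st1.2 hd1 l.length le_rfl (List.replicate l.length 0)
  rw [hplace]
  exact Vw_eq_Cof l

-- ---------- assembling B ----------
theorem b_eq_C (l : List Char) :
    (let buckets : PySem.Dict Char (List Int) :=
      (PySem.List.enumerate l 0).foldl (fun d p => d.modify p.2 [] (· ++ [p.1]))
        PySem.Dict.empty
    (PySem.List.sorted buckets.keys (fun c => c) false).foldl
      (fun acc c => acc ++ buckets.getD c []) []) = Cof l := by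
  show ((PySem.List.sorted ((PySem.List.enumerate l 0).foldl
      (fun d p => d.modify p.2 [] (· ++ [p.1])) PySem.Dict.empty).keys (fun c => c) false).foldl
      (fun acc c => acc ++ ((PySem.List.enumerate l 0).foldl
        (fun d p => d.modify p.2 [] (· ++ [p.1])) PySem.Dict.empty).getD c []) []) = Cof l
  set bk := (PySem.List.enumerate l 0).foldl
      (fun (d : PySem.Dict Char (List Int)) p => d.modify p.2 [] (· ++ [p.1]))
      PySem.Dict.empty with hbk
  have hkeys : bk.keys = PySem.Set.ofList l := by
    rw [hbk]
    rw [PySem.Dict.keys_foldl_modify_key (PySem.List.enumerate l 0) (fun p => p.2)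
      ([] : List Int) (fun _ p => (· ++ [p.1])) PySem.Dict.empty]
    rw [PySem.Dict.keys_empty, PySem.List.map_snd_enumerate]
    rw [PySem.Set.update_eq_append_filter]
    simp
  have hgetD : ∀ c : Char, bk.getD c [] = grp l c := by
    intro c
    have hswap : bk = ((PySem.List.enumerate l 0).map (fun p => (p.2, p.1))).foldl
        (fun (d : PySem.Dict Char (List Int)) q => d.modify q.1 [] (fun x => x ++ [q.2]))
        PySem.Dict.empty := by
      rw [hbk, List.foldl_map]
    rw [hswap, PySem.Dict.getD_foldl_modify_append]
    rw [PySem.Dict.getD_empty, List.nil_append]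
    rw [List.filter_map, List.map_map]
    rw [PySem.List.enumerate_eq_map_pyRange l ' ']
    rw [List.filter_map, List.map_map]
    unfold grp
    simp [Function.comp_def, PySem.List.len_eq]
  rw [hkeys]
  rw [show PySem.List.sorted (PySem.Set.ofList l) (fun c => c) false = csl l from rfl]
  rw [PySem.List.foldl_append_eq_flatMap (fun c => bk.getD c []) (csl l) []]
  rw [List.nil_append]
  rw [funext hgetD]
  rfl

-- ===== VERDICT (by name: the statement is the Claim_ definition above) =====
theorem sort_single_chars_spec : Claim_equal_sort_single_chars := by
  intro text _
  show sort_single_chars text = sort_single_chars_alt text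
  rw [sort_single_chars, sort_single_chars_alt]
  exact (a_eq_C text.toList).trans (b_eq_C text.toList).symm
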